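-- pv_equiv track=rewrite | github.com/levelupcgi/QACodingChallenges | Samples/max_min_in_array.py | max_min_divide_conquer
-- ===== SOURCE A (Python) =====
-- def max_min_divide_conquer(nums, start, end):
--     if start == end:  # Only one element
--         return nums[start], nums[start]
--     elif end == start + 1:  # Two elements
--         return (max(nums[start], nums[end]), min(nums[start], nums[end]))
--     else:
--         mid = (start + end) // 2
--         max1, min1 = max_min_divide_conquer(nums, start, mid)
--         max2, min2 = max_min_divide_conquer(nums, mid+1, end)
--         return max(max1, max2), min(min1, min2)
-- ===== SOURCE B (Python) =====
-- def max_min_divide_conquer(nums, start, end):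
--     cur_max = cur_min = nums[start]
--     for i in range(start + 1, end + 1):
--         v = nums[i]
--         if v > cur_max:
--             cur_max = v
--         elif v < cur_min:
--             cur_min = v
--     return cur_max, cur_min
-- ===== Notes on version B (the rewrite author's own statement) =====
-- stated objective: simpler
-- what changed: Replaces the divide-and-conquer recursion (split at midpoint, combine halves) with a single iterative pass keeping running max/min; no recursion/call overhead and O(1) space.
import Mathlib
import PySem

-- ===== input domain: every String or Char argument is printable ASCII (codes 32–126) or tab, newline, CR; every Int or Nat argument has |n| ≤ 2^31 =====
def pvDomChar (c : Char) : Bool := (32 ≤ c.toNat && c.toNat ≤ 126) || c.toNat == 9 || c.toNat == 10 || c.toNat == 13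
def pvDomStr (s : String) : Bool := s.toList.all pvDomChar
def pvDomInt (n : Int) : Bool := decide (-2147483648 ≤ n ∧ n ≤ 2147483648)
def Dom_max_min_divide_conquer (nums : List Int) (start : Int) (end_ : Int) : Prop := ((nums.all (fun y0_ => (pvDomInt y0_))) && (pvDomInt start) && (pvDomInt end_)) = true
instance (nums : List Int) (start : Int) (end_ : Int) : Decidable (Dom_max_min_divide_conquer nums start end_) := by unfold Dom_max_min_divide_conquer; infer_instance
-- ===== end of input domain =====

-- B replaces A's divide-and-conquer recursion with one iterative pass keeping running max/min (simpler, O(1) space).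

-- ===== PORT A =====
-- Fuel makes the Python recursion total in Lean; inside Pre_ the fuel (length of the
-- interval) always suffices, so the (0,0) exhaustion value is never reached there.
def mmAuxA (nums : List Int) : Nat → Int → Int → Int × Int
  | 0, _, _ => (0, 0)
  | fuel+1, start, end_ =>
    if start = end_ then
      (PySem.List.pyGetD nums start 0, PySem.List.pyGetD nums start 0)
    else if end_ = start + 1 then
      (max (PySem.List.pyGetD nums start 0) (PySem.List.pyGetD nums end_ 0),
       min (PySem.List.pyGetD nums start 0) (PySem.List.pyGetD nums end_ 0))
    else
      let mid := PySem.Int.floordiv (start + end_) 2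
      let r1 := mmAuxA nums fuel start mid
      let r2 := mmAuxA nums fuel (mid + 1) end_
      (max r1.1 r2.1, min r1.2 r2.2)

def max_min_divide_conquer (nums : List Int) (start : Int) (end_ : Int) : Int × Int :=
  mmAuxA nums ((end_ - start).toNat + 1) start end_

-- ===== PORT B =====
def max_min_divide_conquer_alt (nums : List Int) (start : Int) (end_ : Int) : Int × Int :=
  let x := PySem.List.pyGetD nums start 0
  (PySem.List.pyRange (start + 1) (end_ + 1) 1).foldl
    (fun acc i =>
      let v := PySem.List.pyGetD nums i 0
      if v > acc.1 then (v, acc.2) else if v < acc.2 then (acc.1, v) else acc)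
    (x, x)

-- ===== PRECONDITION & SPEC =====
-- Exactly the inputs where Python A returns: a nonempty slice start ≤ end_ whose every
-- index (negative ones wrap) is in range; otherwise A hits IndexError or infinite recursion.
def Pre_max_min_divide_conquer (nums : List Int) (start : Int) (end_ : Int) : Prop :=
  -(nums.length : Int) ≤ start ∧ start ≤ end_ ∧ end_ < (nums.length : Int)
instance (nums : List Int) (start : Int) (end_ : Int) : Decidable (Pre_max_min_divide_conquer nums start end_) := by unfold Pre_max_min_divide_conquer; infer_instance

def pvWitness_max_min_divide_conquer : List Int × Int × Int := ([3, -1, 7, 2], 0, 3)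

def Spec_max_min_divide_conquer (nums : List Int) (start : Int) (end_ : Int) (out : Int × Int) : Prop := out = max_min_divide_conquer_alt nums start end_
instance (nums : List Int) (start : Int) (end_ : Int) (out : Int × Int) : Decidable (Spec_max_min_divide_conquer nums start end_ out) := by unfold Spec_max_min_divide_conquer; infer_instance

-- ===== CLAIM (what is proved, stated in full; the proofs are below) =====
def Claim_equal_max_min_divide_conquer : Prop := ∀ (nums : List Int) (start : Int) (end_ : Int), Dom_max_min_divide_conquer nums start end_ → Pre_max_min_divide_conquer nums start end_ → Spec_max_min_divide_conquer nums start end_ (max_min_divide_conquer nums start end_)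


-- ===== LEMMAS AND PROOFS =====

-- Running max/min over the half-open index range [s, e), seeded with a.
def fMax (nums : List Int) (a s e : Int) : Int :=
  (PySem.List.pyRange s e 1).foldl (fun acc i => max acc (PySem.List.pyGetD nums i 0)) a
def fMin (nums : List Int) (a s e : Int) : Int :=
  (PySem.List.pyRange s e 1).foldl (fun acc i => min acc (PySem.List.pyGetD nums i 0)) a

theorem foldl_max_comm (f : Int → Int) (l : List Int) : ∀ a b : Int,
    l.foldl (fun acc i => max acc (f i)) (max a b) = max a (l.foldl (fun acc i => max acc (f i)) b) := by
  induction l with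
  | nil => intro a b; rfl
  | cons v t ih =>
    intro a b
    simp only [List.foldl_cons, max_assoc]
    exact ih a (max b (f v))

theorem foldl_min_comm (f : Int → Int) (l : List Int) : ∀ a b : Int,
    l.foldl (fun acc i => min acc (f i)) (min a b) = min a (l.foldl (fun acc i => min acc (f i)) b) := by
  induction l with
  | nil => intro a b; rfl
  | cons v t ih =>
    intro a b
    simp only [List.foldl_cons, min_assoc]
    exact ih a (min b (f v))

-- B's one-pass fold with the two branches equals the pair of a max-fold and a min-fold,
-- given the invariant snd ≤ fst of the accumulator.
theorem altFold_eq (nums : List Int) (l : List Int) : ∀ p : Int × Int, p.2 ≤ p.1 →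
    l.foldl (fun acc i =>
        let v := PySem.List.pyGetD nums i 0
        if v > acc.1 then (v, acc.2) else if v < acc.2 then (acc.1, v) else acc) p
      = (l.foldl (fun acc i => max acc (PySem.List.pyGetD nums i 0)) p.1,
         l.foldl (fun acc i => min acc (PySem.List.pyGetD nums i 0)) p.2) := by
  induction l with
  | nil => intro p _; simp
  | cons j t ih =>
    intro p hp
    simp only [List.foldl_cons]
    have hstep : (let v := PySem.List.pyGetD nums j 0;
        if v > p.1 then (v, p.2) else if v < p.2 then (p.1, v) else p)
        = (max p.1 (PySem.List.pyGetD nums j 0), min p.2 (PySem.List.pyGetD nums j 0)) := by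
      set v := PySem.List.pyGetD nums j 0 with hv
      by_cases h1 : v > p.1
      · simp only [if_pos h1]
        have hmx : max p.1 v = v := by omega
        have hmn : min p.2 v = p.2 := by omega
        rw [hmx, hmn]
      · simp only [if_neg h1]
        by_cases h2 : v < p.2
        · simp only [if_pos h2]
          have hmx : max p.1 v = p.1 := by omega
          have hmn : min p.2 v = v := by omega
          rw [hmx, hmn]
        · simp only [if_neg h2]
          have hmx : max p.1 v = p.1 := by omega
          have hmn : min p.2 v = p.2 := by omega
          rw [hmx, hmn]
    rw [hstep]
    exact ih _ (by simp)

theorem alt_eq_folds (nums : List Int) (start end_ : Int) :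
    max_min_divide_conquer_alt nums start end_
      = (fMax nums (PySem.List.pyGetD nums start 0) (start + 1) (end_ + 1),
         fMin nums (PySem.List.pyGetD nums start 0) (start + 1) (end_ + 1)) := by
  unfold max_min_divide_conquer_alt fMax fMin
  exact altFold_eq nums _ (PySem.List.pyGetD nums start 0, PySem.List.pyGetD nums start 0) le_rfl

theorem fMax_split (nums : List Int) (a s m e : Int) (h1 : s ≤ m) (h2 : m < e) :
    fMax nums a s (e + 1)
      = max (fMax nums a s (m + 1)) (fMax nums (PySem.List.pyGetD nums (m + 1) 0) (m + 1 + 1) (e + 1)) := by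
  unfold fMax
  rw [PySem.List.pyRange_one_append (s) (m + 1) (e + 1) (by omega) (by omega),
      List.foldl_append,
      PySem.List.pyRange_one_cons (by omega : m + 1 < e + 1)]
  simp only [List.foldl_cons]
  exact foldl_max_comm (fun i => PySem.List.pyGetD nums i 0) _ _ _

theorem fMin_split (nums : List Int) (a s m e : Int) (h1 : s ≤ m) (h2 : m < e) :
    fMin nums a s (e + 1)
      = min (fMin nums a s (m + 1)) (fMin nums (PySem.List.pyGetD nums (m + 1) 0) (m + 1 + 1) (e + 1)) := by
  unfold fMin
  rw [PySem.List.pyRange_one_append (s) (m + 1) (e + 1) (by omega) (by omega),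
      List.foldl_append,
      PySem.List.pyRange_one_cons (by omega : m + 1 < e + 1)]
  simp only [List.foldl_cons]
  exact foldl_min_comm (fun i => PySem.List.pyGetD nums i 0) _ _ _

theorem mmAuxA_eq (nums : List Int) : ∀ (fuel : Nat) (start end_ : Int),
    start ≤ end_ → (end_ - start).toNat < fuel →
    mmAuxA nums fuel start end_
      = (fMax nums (PySem.List.pyGetD nums start 0) (start + 1) (end_ + 1),
         fMin nums (PySem.List.pyGetD nums start 0) (start + 1) (end_ + 1)) := by
  intro fuel
  induction fuel with
  | zero => intro s e _ h; omega
  | succ n ih =>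
    intro s e hse hfuel
    by_cases h1 : s = e
    · subst h1
      simp [mmAuxA, fMax, fMin, PySem.List.pyRange_one_eq_nil (by omega : s + 1 ≥ s + 1)]
    · by_cases h2 : e = s + 1
      · subst h2
        simp only [mmAuxA, if_neg h1, reduceIte]
        unfold fMax fMin
        rw [PySem.List.pyRange_one_cons (by omega : s + 1 < s + 1 + 1),
            PySem.List.pyRange_one_eq_nil (by omega : s + 1 + 1 ≥ s + 1 + 1)]
        simp
      · simp only [mmAuxA, if_neg h1, if_neg h2]
        have hmid := PySem.Int.floordiv_two_mid_bounds hse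
        set mid := PySem.Int.floordiv (s + e) 2 with hm
        have hfd : mid = (s + e) / 2 := by
          rw [hm, PySem.Int.floordiv_eq_ediv_of_pos (by omega : (0:Int) < 2)]
        have hsm : s ≤ mid := hmid.1
        have hme : mid < e := by omega
        rw [ih s mid hsm (by omega), ih (mid + 1) e (by omega) (by omega)]
        have hfx := fMax_split nums (PySem.List.pyGetD nums s 0) (s + 1) mid e (by omega) hme
        have hfn := fMin_split nums (PySem.List.pyGetD nums s 0) (s + 1) mid e (by omega) hme
        simp [hfx, hfn]

-- ===== VERDICT (by name: the statement is the Claim_ definition above) =====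
theorem max_min_divide_conquer_spec : Claim_equal_max_min_divide_conquer := by
  intro nums start end_ _ hpre
  unfold Spec_max_min_divide_conquer max_min_divide_conquer
  rw [alt_eq_folds, mmAuxA_eq nums _ start end_ hpre.2.1 (by omega)]
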